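-- pv_equiv track=rewrite | github.com/anhntv161/optimal-portfolio-design | src/Opd_incremental_sat_ver2_binary_sym.py | _build_totalizer_manual
-- ===== SOURCE A (Python) =====
-- def _totalizer_merge(left_out, right_out, var_counter, clauses):
--     """
--     Merge two totalizer output lists into a combined output list.
--
--     Semantics (0-indexed):
--         left_out[i]  = 1  =>  left_sum  >= i+1
--         right_out[j] = 1  =>  right_sum >= j+1
--         out[s]       = 1  =>  total_sum >= s+1
--
--     Only UPWARD clauses are added (sufficient for reified at-most encoding):
--         For i in [0..a], j in [0..b], s = i+j (s >= 1):
--             (-left_out[i-1]  OR  -right_out[j-1]  OR  out[s-1])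
--         meaning: left >= i  AND  right >= j  =>  total >= i+j
--     """
--     a = len(left_out)
--     b = len(right_out)
--     out_size = a + b
--
--     out = []
--     for _ in range(out_size):
--         out.append(var_counter[0])
--         var_counter[0] += 1
--
--     for i in range(a + 1):
--         for j in range(b + 1):
--             s = i + j
--             if s == 0 or s > out_size:
--                 continue
--             cl = []
--             if i >= 1:
--                 cl.append(-left_out[i - 1])
--             if j >= 1:
--                 cl.append(-right_out[j - 1])
--             cl.append(out[s - 1])
--             clauses.append(cl)
--
--     return out
--
-- def _build_totalizer_manual(input_lits, var_counter, clauses):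
--     """
--     Recursively build a Totalizer for input_lits.
--
--     Returns: out[0..n-1] where out[t] = 1  =>  sum(input_lits) >= t+1
--     Only upward clauses are generated.
--     """
--     n = len(input_lits)
--     if n == 0:
--         return []
--     if n == 1:
--         return [input_lits[0]]
--     mid = n // 2
--     left_out  = _build_totalizer_manual(input_lits[:mid], var_counter, clauses)
--     right_out = _build_totalizer_manual(input_lits[mid:], var_counter, clauses)
--     return _totalizer_merge(left_out, right_out, var_counter, clauses)
-- ===== SOURCE B (Python) =====
-- # B: iterative explicit-stack post-order traversal instead of recursion.
-- # Same in-place effects as A: appends to clauses and bumps var_counter[0].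
-- def _totalizer_merge(left_out, right_out, var_counter, clauses):
--     a = len(left_out)
--     b = len(right_out)
--     out_size = a + b
--
--     out = []
--     for _ in range(out_size):
--         out.append(var_counter[0])
--         var_counter[0] += 1
--
--     for i in range(a + 1):
--         for j in range(b + 1):
--             s = i + j
--             if s == 0 or s > out_size:
--                 continue
--             cl = []
--             if i >= 1:
--                 cl.append(-left_out[i - 1])
--             if j >= 1:
--                 cl.append(-right_out[j - 1])
--             cl.append(out[s - 1])
--             clauses.append(cl)
--
--     return out
--
-- def _build_totalizer_manual(input_lits, var_counter, clauses):
--     results = []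
--     tasks = [(False, input_lits)]
--     while tasks:
--         is_merge, lits = tasks.pop()
--         if is_merge:
--             right = results.pop()
--             left = results.pop()
--             results.append(_totalizer_merge(left, right, var_counter, clauses))
--         elif len(lits) <= 1:
--             results.append(list(lits))
--         else:
--             mid = len(lits) // 2
--             tasks.append((True, None))
--             tasks.append((False, lits[mid:]))
--             tasks.append((False, lits[:mid]))
--     return results[-1]
-- ===== Notes on version B (the rewrite author's own statement) =====
-- stated objective: alternative
-- what changed: Replaced the recursive divide-and-conquer tree build with an explicit-stack iterative post-order traversal (task stack of build/merge frames plus a results stack); the merge helper is unchanged.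
import Mathlib
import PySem

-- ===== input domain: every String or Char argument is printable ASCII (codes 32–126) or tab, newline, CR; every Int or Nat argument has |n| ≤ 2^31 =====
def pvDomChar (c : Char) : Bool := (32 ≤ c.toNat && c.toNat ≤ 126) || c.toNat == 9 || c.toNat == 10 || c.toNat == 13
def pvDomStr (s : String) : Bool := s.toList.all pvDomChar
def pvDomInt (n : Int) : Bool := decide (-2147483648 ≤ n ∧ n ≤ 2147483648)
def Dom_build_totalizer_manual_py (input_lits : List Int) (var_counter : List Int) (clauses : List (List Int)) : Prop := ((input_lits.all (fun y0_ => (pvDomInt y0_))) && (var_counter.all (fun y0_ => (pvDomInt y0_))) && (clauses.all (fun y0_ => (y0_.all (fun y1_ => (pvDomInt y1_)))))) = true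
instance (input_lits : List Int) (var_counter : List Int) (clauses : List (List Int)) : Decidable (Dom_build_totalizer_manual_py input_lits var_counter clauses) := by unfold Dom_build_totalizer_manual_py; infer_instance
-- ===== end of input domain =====

-- B replaces A's recursion by an explicit-stack iterative post-order traversal (same var/clause
-- order); equivalence is about the return value only — both Pythons also mutate var_counter and
-- clauses identically in place.


-- ===== PORT A =====
-- _totalizer_merge: state (counter value, clauses list) is threaded explicitly; the Python
-- mutations of var_counter[0] and clauses become the returned counter/clauses components.
-- All list indexings (left_out[i-1], right_out[j-1], out[s-1]) are in range for the loop
-- indices, so getD is exact.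
def mergeP (L R : List Int) (c : Int) (cls : List (List Int)) : List Int × Int × List (List Int) :=
  let a := L.length
  let b := R.length
  let sz := a + b
  let outc := (List.range sz).foldl (fun (st : List Int × Int) _ => (st.1 ++ [st.2], st.2 + 1)) ([], c)
  let out := outc.1
  let cls' := (List.range (a + 1)).foldl (fun acc i =>
      (List.range (b + 1)).foldl (fun acc2 j =>
        let s := i + j
        if s = 0 ∨ s > sz then acc2
        else
          let cl := (if 1 ≤ i then [-(L.getD (i - 1) 0)] else []) ++
                    (if 1 ≤ j then [-(R.getD (j - 1) 0)] else []) ++ [out.getD (s - 1) 0]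
          acc2 ++ [cl]) acc) cls
  (out, outc.2, cls')

-- A's recursion; Python slices input_lits[:mid] / input_lits[mid:] with 0 ≤ mid ≤ n are exactly
-- take/drop.  Python reads var_counter[0] only when a merge happens (n ≥ 2); Pre_ guarantees
-- var_counter is nonempty then, so headD at the wrapper is exact on Pre_.

-- A's recursion, with a Nat fuel argument as a pure totality guard (fuel = input length at the
-- entry point; every recursive call strictly shrinks the list, so the guard is never hit).
-- Python slices input_lits[:mid] / input_lits[mid:] with 0 ≤ mid ≤ n are exactly take/drop.
-- Python reads var_counter[0] only when a merge happens (n ≥ 2); Pre_ guarantees var_counter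
-- is nonempty then, so headD at the wrapper is exact on Pre_.
def goA : Nat → List Int → Int → List (List Int) → List Int × Int × List (List Int)
  | 0, _, c, cls => ([], c, cls)  -- fuel guard (fuel 0 forces lits = [], where A returns [])
  | f + 1, lits, c, cls =>
    if lits.length = 0 then ([], c, cls)
    else if lits.length = 1 then ([lits.getD 0 0], c, cls)
    else
      let mid := lits.length / 2
      let Lr := goA f (lits.take mid) c cls
      let Rr := goA f (lits.drop mid) Lr.2.1 Lr.2.2
      mergeP Lr.1 Rr.1 Rr.2.1 Rr.2.2

def build_totalizer_manual_py (input_lits : List Int) (var_counter : List Int) (clauses : List (List Int)) : List Int :=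
  (goA input_lits.length input_lits (var_counter.headD 0) clauses).1

-- ===== PORT B =====
-- Explicit-stack post-order traversal: task stack (front = top) of (is_merge, lits) frames and a
-- results stack; Python's list-end push/pop becomes cons/head at the front.  The Nat fuel is a
-- pure totality guard for the while loop (5*n+1 steps always suffice, proved in the lemmas).

-- results.pop(); results.pop(); results.append(merge(..)) as a helper (results end = list front)
def popMerge (results : List (List Int)) (c : Int) (cls : List (List Int)) :
    List (List Int) × Int × List (List Int) :=
  match results with
  | r :: l :: rs =>
    let m := mergeP l r c cls
    (m.1 :: rs, m.2.1, m.2.2)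
  | _ => (results, c, cls)  -- unreachable: a merge frame always has two results below it

def goB : Nat → List (Bool × List Int) → List (List Int) → Int → List (List Int) →
    List (List Int) × Int × List (List Int)
  | 0, _, results, c, cls => (results, c, cls)  -- fuel guard, never hit from the entry point
  | _ + 1, [], results, c, cls => (results, c, cls)
  | f + 1, (isM, lits) :: rest, results, c, cls =>
    if isM then
      let p := popMerge results c cls
      goB f rest p.1 p.2.1 p.2.2
    else if lits.length ≤ 1 then goB f rest (lits :: results) c cls
    else
      let mid := lits.length / 2
      goB f ((false, lits.take mid) :: (false, lits.drop mid) :: (true, []) :: rest) results c cls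

def build_totalizer_manual_py_alt (input_lits : List Int) (var_counter : List Int) (clauses : List (List Int)) : List Int :=
  ((goB (5 * input_lits.length + 1) [(false, input_lits)] [] (var_counter.headD 0) clauses).1).headD []

-- ===== PRECONDITION & SPEC =====
-- Pre_ excludes exactly the inputs where Python A raises IndexError: var_counter empty while a
-- merge is reached (that needs at least two input literals, which make var_counter[0] be read).
def Pre_build_totalizer_manual_py (input_lits : List Int) (var_counter : List Int) (clauses : List (List Int)) : Prop :=
  input_lits.length ≤ 1 ∨ var_counter ≠ []
instance (input_lits : List Int) (var_counter : List Int) (clauses : List (List Int)) : Decidable (Pre_build_totalizer_manual_py input_lits var_counter clauses) := by unfold Pre_build_totalizer_manual_py; infer_instance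

def pvWitness_build_totalizer_manual_py : List Int × List Int × List (List Int) := ([1, 2, 3], [4], [])

def Spec_build_totalizer_manual_py (input_lits : List Int) (var_counter : List Int) (clauses : List (List Int)) (out : List Int) : Prop := out = build_totalizer_manual_py_alt input_lits var_counter clauses
instance (input_lits : List Int) (var_counter : List Int) (clauses : List (List Int)) (out : List Int) : Decidable (Spec_build_totalizer_manual_py input_lits var_counter clauses out) := by unfold Spec_build_totalizer_manual_py; infer_instance

-- ===== CLAIM (what is proved, stated in full; the proofs are below) =====
def Claim_equal_build_totalizer_manual_py : Prop := ∀ (input_lits : List Int) (var_counter : List Int) (clauses : List (List Int)), Dom_build_totalizer_manual_py input_lits var_counter clauses → Pre_build_totalizer_manual_py input_lits var_counter clauses → Spec_build_totalizer_manual_py input_lits var_counter clauses (build_totalizer_manual_py input_lits var_counter clauses)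

-- ===== LEMMAS AND PROOFS =====

-- weight of a task frame: an upper bound on the loop steps it and its descendants take
def wtB (t : Bool × List Int) : Nat :=
  if t.1 then 1 else if t.2.length = 0 then 1 else 5 * t.2.length - 3

theorem wtB_pos (t : Bool × List Int) : 1 ≤ wtB t := by
  unfold wtB; split_ifs <;> omega

-- goA's result does not depend on the fuel once the fuel covers the list length
theorem goA_mono (f : Nat) : ∀ (g : Nat) (lits : List Int) (c : Int) (cls : List (List Int)),
    lits.length ≤ f → lits.length ≤ g → goA f lits c cls = goA g lits c cls := by
  induction f with
  | zero =>
    intro g lits c cls hf _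
    have : lits = [] := List.eq_nil_of_length_eq_zero (by omega)
    subst this
    cases g <;> simp [goA]
  | succ f ih =>
    intro g lits c cls hf hg
    match g with
    | 0 =>
      have : lits = [] := List.eq_nil_of_length_eq_zero (by omega)
      subst this
      simp [goA]
    | g + 1 =>
      by_cases h1 : lits.length ≤ 1
      · simp only [goA]
        split_ifs <;> first | rfl | omega
      · simp only [goA]
        rw [if_neg (by omega), if_neg (by omega), if_neg (by omega), if_neg (by omega)]
        have ht : (lits.take (lits.length / 2)).length ≤ f := by
          simp only [List.length_take]; omega
        have htg : (lits.take (lits.length / 2)).length ≤ g := by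
          simp only [List.length_take]; omega
        have hd : (lits.drop (lits.length / 2)).length ≤ f := by
          simp only [List.length_drop]; omega
        have hdg : (lits.drop (lits.length / 2)).length ≤ g := by
          simp only [List.length_drop]; omega
        rw [ih g _ c cls ht htg, ih g _ _ _ hd hdg]

-- goB's result does not depend on the fuel once the fuel covers the total task weight
theorem goB_mono (f : Nat) : ∀ (g : Nat) (tasks : List (Bool × List Int))
    (results : List (List Int)) (c : Int) (cls : List (List Int)),
    (tasks.map wtB).sum ≤ f → (tasks.map wtB).sum ≤ g →
    goB f tasks results c cls = goB g tasks results c cls := by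
  induction f with
  | zero =>
    intro g tasks results c cls hf _
    match tasks with
    | [] => cases g <;> simp [goB]
    | t :: rest =>
      exfalso
      have := wtB_pos t
      simp only [List.map_cons, List.sum_cons] at hf
      omega
  | succ f ih =>
    intro g tasks results c cls hf hg
    match tasks with
    | [] => cases g <;> simp [goB]
    | (isM, lits) :: rest =>
      have hw := wtB_pos (isM, lits)
      simp only [List.map_cons, List.sum_cons] at hf hg
      match g with
      | 0 => omega
      | g + 1 =>
        simp only [goB]
        by_cases hM : isM
        · subst hM
          simp only [if_pos rfl]
          exact ih g rest _ _ _ (by omega) (by omega)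
        · simp only [if_neg hM]
          by_cases h1 : lits.length ≤ 1
          · simp only [if_pos h1]
            exact ih g rest _ _ _ (by omega) (by omega)
          · simp only [if_neg h1]
            have hwl : wtB (isM, lits) = 5 * lits.length - 3 := by
              simp only [wtB]
              rw [if_neg hM, if_neg (by omega : ¬ lits.length = 0)]
            have hnew : ((((false, lits.take (lits.length / 2)) ::
                (false, lits.drop (lits.length / 2)) :: (true, ([] : List Int)) :: rest)).map wtB).sum
                = (5 * (lits.length / 2) - 3) +
                  ((5 * (lits.length - lits.length / 2) - 3) + (1 + (rest.map wtB).sum)) := by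
              simp only [List.map_cons, List.sum_cons, wtB, List.length_take, List.length_drop,
                Bool.false_eq_true, if_false]
              split_ifs <;> omega
            rw [hwl] at hf hg
            exact ih g _ _ _ _ (by rw [hnew]; omega) (by rw [hnew]; omega)

-- Processing a build frame on top of the stack is the same as running A's recursion on that
-- segment and pushing its output, with the state threaded through.
theorem goB_build (lits : List Int) : ∀ (f : Nat) (rest : List (Bool × List Int))
    (results : List (List Int)) (c : Int) (cls : List (List Int)),
    ((((false, lits) :: rest)).map wtB).sum ≤ f →
    goB f ((false, lits) :: rest) results c cls =
      goB ((rest.map wtB).sum) rest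
        ((goA lits.length lits c cls).1 :: results)
        (goA lits.length lits c cls).2.1 (goA lits.length lits c cls).2.2 := by
  intro f rest results c cls hf
  have hw := wtB_pos (false, lits)
  simp only [List.map_cons, List.sum_cons] at hf
  match f with
  | 0 => exact absurd hf (by omega)
  | f + 1 =>
    by_cases h1 : lits.length ≤ 1
    · simp only [goB, Bool.false_eq_true, if_false, if_pos h1]
      rw [goB_mono f ((rest.map wtB).sum) rest _ _ _ (by omega) (le_refl _)]
      by_cases h0 : lits.length = 0
      · have : lits = [] := List.eq_nil_of_length_eq_zero h0
        subst this
        simp [goA]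
      · have hl : lits.length = 1 := by omega
        match lits, hl with
        | [x], _ => simp [goA]
    · simp only [goB, Bool.false_eq_true, if_false, if_neg h1]
      have hb : ((((false, lits.take (lits.length / 2)) ::
          (false, lits.drop (lits.length / 2)) :: (true, ([] : List Int)) :: rest)).map wtB).sum
          ≤ f := by
        simp only [wtB, Bool.false_eq_true, if_false] at hf
        rw [if_neg (by omega : ¬ lits.length = 0)] at hf
        simp only [List.map_cons, List.sum_cons, wtB, List.length_take, List.length_drop,
          Bool.false_eq_true, if_false]
        split_ifs <;> omega
      rw [goB_build (lits.take (lits.length / 2)) f _ _ _ _ hb]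
      rw [goB_build (lits.drop (lits.length / 2)) _ _ _ _ _ (le_refl _)]
      have hsum : ((((true, ([] : List Int)) :: rest)).map wtB).sum = (rest.map wtB).sum + 1 := by
        simp [wtB]
        omega
      rw [hsum]
      simp only [goB, if_pos rfl, popMerge]
      obtain ⟨k, hk⟩ : ∃ k, lits.length = k + 1 := ⟨lits.length - 1, by omega⟩
      conv_rhs => rw [hk]
      simp only [goA]
      rw [if_neg (by omega : ¬ lits.length = 0), if_neg (by omega : ¬ lits.length = 1)]
      rw [goA_mono k (lits.take (lits.length / 2)).length (lits.take (lits.length / 2)) c cls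
            (by simp only [List.length_take]; omega) (le_refl _)]
      rw [goA_mono k (lits.drop (lits.length / 2)).length (lits.drop (lits.length / 2)) _ _
            (by simp only [List.length_drop]; omega) (le_refl _)]
      simp only [if_true]
termination_by lits.length
decreasing_by
  · simp only [List.length_take]; omega
  · simp only [List.length_drop]; omega

-- ===== VERDICT (by name: the statement is the Claim_ definition above) =====
theorem build_totalizer_manual_py_spec : Claim_equal_build_totalizer_manual_py := by
  intro input_lits var_counter clauses _ _
  unfold Spec_build_totalizer_manual_py build_totalizer_manual_py build_totalizer_manual_py_alt
  rw [goB_build input_lits (5 * input_lits.length + 1) [] []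
        (var_counter.headD 0) clauses
        (by simp only [List.map_cons, List.map_nil, List.sum_cons, List.sum_nil, wtB,
              Bool.false_eq_true, if_false]
            split_ifs <;> omega)]
  simp [goB]
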